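-- pv_equiv track=rewrite | github.com/bunceandbean/advent-of-code | 2015/day05/part2.py | repeatCheck
-- ===== SOURCE A (Python) =====
-- def repeatCheck(string):
--     count = 0
--     for char in string:
--         if count < len(string) - 2:
--             if string[count + 2] == char:
--                 return True
--         count += 1
--     return False
-- ===== SOURCE B (Python) =====
-- def repeatCheck(string):
--     positions = {}
--     for i, c in enumerate(string):
--         positions.setdefault(c, []).append(i)
--     for idxs in positions.values():
--         index_set = set(idxs)
--         if any(i + 2 in index_set for i in idxs):
--             return True
--     return False
-- ===== Notes on version B (the rewrite author's own statement) =====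
-- stated objective: alternative
-- what changed: B groups character positions into a dictionary (char -> list of indices) in one pass, then checks each character's position set for two positions exactly 2 apart, instead of A's single indexed scan comparing string[count+2] with each char.
import Mathlib
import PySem

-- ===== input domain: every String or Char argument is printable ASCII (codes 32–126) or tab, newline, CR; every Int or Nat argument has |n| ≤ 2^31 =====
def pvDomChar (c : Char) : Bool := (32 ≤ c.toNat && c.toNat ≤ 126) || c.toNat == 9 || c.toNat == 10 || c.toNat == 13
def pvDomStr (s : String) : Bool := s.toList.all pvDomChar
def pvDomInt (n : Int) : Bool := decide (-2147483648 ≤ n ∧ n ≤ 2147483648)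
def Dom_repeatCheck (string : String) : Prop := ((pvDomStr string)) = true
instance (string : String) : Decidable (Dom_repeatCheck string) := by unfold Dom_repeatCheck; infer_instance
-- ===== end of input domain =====

-- B groups the positions of each character into a dictionary and looks for two positions of the
-- same character exactly two apart, instead of A's single indexed scan (alternative algorithm).

-- ===== PORT A =====
def pvLoopA (cs : List Char) (s : List Char) (count : Int) : Bool :=
  match cs with
  | [] => false
  | c :: rest =>
    if count < (s.length : Int) - 2 then
      if PySem.List.pyGet? s (count + 2) == some c then true
      else pvLoopA rest s (count + 1)
    else pvLoopA rest s (count + 1)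

def repeatCheck (string : String) : Bool :=
  pvLoopA string.toList string.toList 0

-- ===== PORT B =====
def repeatCheck_alt (string : String) : Bool :=
  let positions : PySem.Dict Char (List Int) :=
    (PySem.List.enumerate string.toList).foldl
      (fun d p => d.modify p.2 [] (fun v => v ++ [p.1])) PySem.Dict.empty
  positions.values.any (fun idxs =>
    let indexSet : PySem.Set Int := PySem.Set.ofList idxs
    idxs.any (fun i => indexSet.contains (i + 2)))

-- ===== PRECONDITION & SPEC =====
def Spec_repeatCheck (string : String) (out : Bool) : Prop := out = repeatCheck_alt string
instance (string : String) (out : Bool) : Decidable (Spec_repeatCheck string out) := by unfold Spec_repeatCheck; infer_instance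

-- ===== CLAIM (what is proved, stated in full; the proofs are below) =====
def Claim_equal_repeatCheck : Prop := ∀ (string : String), Dom_repeatCheck string → Spec_repeatCheck string (repeatCheck string)

-- ===== LEMMAS AND PROOFS =====

-- A's loop at counter k equals "some index j ≥ k has l[j] = l[j+2]" (zip formulation).
lemma pvLoopA_eq (cs s : List Char) (k : Nat) (hcs : cs = s.drop k) :
    pvLoopA cs s (k : Int) = (cs.zip (s.drop (k + 2))).any (fun p => p.1 == p.2) := by
  induction cs generalizing k with
  | nil => simp [pvLoopA]
  | cons c rest ih =>
    have hrest : rest = s.drop (k + 1) := by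
      have := congrArg List.tail hcs
      simpa [List.tail_drop] using this
    by_cases h : k + 2 < s.length
    · have hget : PySem.List.pyGet? s ((k : Int) + 2) = some s[k + 2] := by
        have : ((k : Int) + 2) = ((k + 2 : Nat) : Int) := by push_cast; ring
        rw [this, PySem.List.pyGet?_natCast]
        simp [h]
      have hc : c = s[k]'(by omega) := by
        have := congrArg (fun l => l.head?) hcs
        simpa [List.head?_drop, List.getElem?_eq_getElem (show k < s.length by omega)] using this
      have hdrop2 : s.drop (k + 2) = s[k + 2] :: s.drop (k + 3) := by
        rw [List.drop_eq_getElem_cons h]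
      have hlt : (k : Int) < (s.length : Int) - 2 := by omega
      rw [pvLoopA]
      simp only [hlt, if_pos, hget, hdrop2]
      by_cases he : s[k + 2] = c
      · simp [he]
      · have h1 : ((some s[k+2] == some c) = false) := by simp [he]
        have h2 : ((c == s[k+2]) = false) := by
          simp [BEq.beq]; exact fun hh => he hh.symm
        simp only [h1, Bool.false_eq_true, if_false]
        have := ih (k + 1) hrest
        rw [show (k : Int) + 1 = ((k + 1 : Nat) : Int) by push_cast; ring, this]
        rw [show k + 1 + 2 = k + 3 by omega]
        simp only [List.zip_cons_cons, List.any_cons, h2, Bool.false_or]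
    · have hge : ¬ ((k : Int) < (s.length : Int) - 2) := by omega
      have hd2 : s.drop (k + 2) = [] := List.drop_eq_nil_of_le (by omega)
      have hd3 : s.drop (k + 1 + 2) = [] := List.drop_eq_nil_of_le (by omega)
      rw [pvLoopA]
      simp only [hge, if_false]
      have := ih (k + 1) hrest
      rw [show (k : Int) + 1 = ((k + 1 : Nat) : Int) by push_cast; ring, this]
      simp [hd2, hd3]

-- The common characterisation both programs compute.
def hasXYX (l : List Char) : Prop := ∃ k : Nat, k + 2 < l.length ∧ l[k]? = l[k + 2]?

lemma repeatCheck_iff (s : String) : repeatCheck s = true ↔ hasXYX s.toList := by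
  set l := s.toList with hl
  have h := pvLoopA_eq l l 0 rfl
  unfold repeatCheck
  rw [← hl]
  simp only [Nat.cast_zero] at h
  rw [h, List.any_eq_true]
  constructor
  · rintro ⟨p, hp, hb⟩
    rw [List.mem_iff_getElem] at hp
    obtain ⟨k, hk, hpe⟩ := hp
    have hk' : k + 2 < l.length := by
      simp only [List.length_zip, List.length_drop] at hk
      omega
    refine ⟨k, hk', ?_⟩
    have : p = (l[k]'(by omega), (l.drop 2)[k]'(by simp; omega)) := by
      rw [← hpe]; exact List.getElem_zip
    rw [this] at hb
    simp only [beq_iff_eq] at hb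
    rw [List.getElem?_eq_getElem (by omega), List.getElem?_eq_getElem hk']
    simpa [List.getElem_drop, Nat.add_comm] using congrArg some hb
  · rintro ⟨k, hk, he⟩
    have hkz : k < (l.zip (l.drop 2)).length := by
      simp only [List.length_zip, List.length_drop]; omega
    refine ⟨(l.zip (l.drop 2))[k], List.getElem_mem hkz, ?_⟩
    rw [List.getElem_zip]
    rw [List.getElem?_eq_getElem (by omega), List.getElem?_eq_getElem hk] at he
    have : l[k]'(by omega) = l[k+2]'hk := by exact Option.some.inj he
    simpa [List.getElem_drop, Nat.add_comm] using this

lemma mem_positions_iff (l : List Char) (c : Char) (i : Int) :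
    i ∈ (((PySem.List.enumerate l).map Prod.swap).filter (fun p => p.1 == c)).map (·.2)
    ↔ ∃ k : Nat, k < l.length ∧ i = (k : Int) ∧ l[k]? = some c := by
  simp only [List.mem_map, List.mem_filter, List.mem_map, PySem.List.mem_enumerate_iff]
  constructor
  · rintro ⟨p, ⟨⟨q, ⟨k, hk, hq⟩, hswap⟩, hc⟩, hi⟩
    subst hq; subst hswap
    simp only [Prod.swap] at hc hi
    refine ⟨k, hk, by simpa using hi.symm, ?_⟩
    rw [List.getElem?_eq_getElem hk]
    simpa [beq_iff_eq] using congrArg some (by simpa using hc)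
  · rintro ⟨k, hk, hi, hc⟩
    rw [List.getElem?_eq_getElem hk] at hc
    refine ⟨(c, (k : Int)), ⟨⟨((k : Int), l[k]), ⟨k, hk, by simp⟩, ?_⟩, by simp⟩, by simpa using hi.symm⟩
    simp [Prod.swap, Option.some.inj hc]

-- B's dictionary, as built by the fold over enumerate (proof-only abbreviation).
def pvPositions (l : List Char) : PySem.Dict Char (List Int) :=
  (PySem.List.enumerate l).foldl
    (fun d p => d.modify p.2 [] (fun v => v ++ [p.1])) PySem.Dict.empty

lemma nodup_keys_pvPositions (l : List Char) : (pvPositions l).keys.Nodup := by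
  unfold pvPositions
  exact PySem.Dict.nodup_keys_foldl_modify_key (PySem.List.enumerate l) (fun p => p.2)
    ([] : List Int) (fun d p v => v ++ [p.1]) PySem.Dict.empty List.nodup_nil

lemma keys_pvPositions (l : List Char) : (pvPositions l).keys = PySem.Set.ofList l := by
  unfold pvPositions
  have h := PySem.Dict.keys_foldl_modify_key (PySem.List.enumerate l) (fun p => p.2)
    ([] : List Int) (fun d p v => v ++ [p.1]) PySem.Dict.empty
  have h2 : PySem.Set.update ((PySem.Dict.empty : PySem.Dict Char (List Int)).keys)
      ((PySem.List.enumerate l).map (fun p => p.2)) = PySem.Set.ofList l := by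
    rw [PySem.List.map_snd_enumerate]
    exact PySem.Set.update_nil_left l
  exact h.trans h2

lemma getD_pvPositions (l : List Char) (c : Char) :
    (pvPositions l).getD c []
    = (((PySem.List.enumerate l).map Prod.swap).filter (fun p => p.1 == c)).map (·.2) := by
  unfold pvPositions
  have h := PySem.Dict.getD_foldl_modify_append ((PySem.List.enumerate l).map Prod.swap)
    (PySem.Dict.empty : PySem.Dict Char (List Int)) c
  rw [List.foldl_map] at h
  exact h

lemma repeatCheck_alt_iff (s : String) : repeatCheck_alt s = true ↔ hasXYX s.toList := by
  have hrfl : repeatCheck_alt s = (pvPositions s.toList).values.any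
      (fun idxs => idxs.any (fun i => (PySem.Set.ofList idxs).contains (i + 2))) := rfl
  rw [hrfl, PySem.Dict.values_eq_map_keys _ (nodup_keys_pvPositions _) [],
      keys_pvPositions, List.any_map, List.any_eq_true]
  constructor
  · rintro ⟨c, hc, hb⟩
    simp only [Function.comp, List.any_eq_true] at hb
    obtain ⟨i, hi, hmem⟩ := hb
    rw [getD_pvPositions, mem_positions_iff] at hi
    have hmem' : (i + 2) ∈ (pvPositions s.toList).getD c [] := by
      rw [← PySem.Set.mem_ofList]
      exact (PySem.Set.contains_iff _ _).mp hmem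
    rw [getD_pvPositions, mem_positions_iff] at hmem'
    obtain ⟨k, hk, hik, hck⟩ := hi
    obtain ⟨k2, hk2, hik2, hck2⟩ := hmem'
    have hk2e : k2 = k + 2 := by omega
    subst hk2e
    exact ⟨k, hk2, by rw [hck, hck2]⟩
  · rintro ⟨k, hk, he⟩
    have hkl : k < s.toList.length := by omega
    have hc : s.toList[k]? = some (s.toList[k]'hkl) := List.getElem?_eq_getElem hkl
    refine ⟨s.toList[k]'hkl, ?_, ?_⟩
    · rw [PySem.Set.mem_ofList]; exact List.getElem_mem hkl
    · simp only [Function.comp, List.any_eq_true]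
      refine ⟨(k : Int), ?_, ?_⟩
      · rw [getD_pvPositions, mem_positions_iff]
        exact ⟨k, hkl, rfl, hc⟩
      · rw [PySem.Set.contains_iff, PySem.Set.mem_ofList, getD_pvPositions, mem_positions_iff]
        refine ⟨k + 2, hk, by push_cast; ring, ?_⟩
        rw [← he, hc]

-- ===== VERDICT (by name: the statement is the Claim_ definition above) =====
theorem repeatCheck_spec : Claim_equal_repeatCheck := by
  intro s _
  unfold Spec_repeatCheck
  have hA := repeatCheck_iff s
  have hB := repeatCheck_alt_iff s
  by_cases h : hasXYX s.toList
  · rw [hA.mpr h, hB.mpr h]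
  · have hA0 : repeatCheck s = false := by
      cases hc : repeatCheck s
      · rfl
      · exact absurd (hA.mp hc) h
    have hB0 : repeatCheck_alt s = false := by
      cases hc : repeatCheck_alt s
      · rfl
      · exact absurd (hB.mp hc) h
    rw [hA0, hB0]
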